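-- pv_equiv track=rewrite | github.com/johannes2moll/rad-report-structuring | src/utils.py | reformat_radiology_output
-- ===== SOURCE A (Python) =====
-- def reformat_radiology_output(output_list):
--     formatted_outputs = []
--     for sample in output_list:
--         # Remove extra <pad> tokens
--         sample = sample.replace("<pad>", "").strip()
--
--         # Split into sections based on known headers or patterns
--         sections = ["History:", "Technique:", "Comparison:", "Findings:", "Impression:"]
--         organs = ['Lungs and Airways:', 'Musculoskeletal and Chest Wall:','Cardiovascular:','Tubes, Catheters, and Support Devices:','Abdominal:','Pleura:','Other:','Hila and Mediastinum:']
--         for section in sections: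
--             sample = sample.replace(section, f"\n{section}")
--         for organ in organs:
--             try:
--                 sample = sample.replace(organ, f"\n{organ}")
--             except:
--                 continue
--         # Ensure newlines after colons and before bullet points
--         sample = sample.replace("- ", "\n- ")
--         # Ensure newlines before numbers
--         try: sample = sample.replace("1.", "\n1.")
--         except: continue
--         try: sample = sample.replace("2.", "\n2.")
--         except: continue
--         try: sample = sample.replace("3.", "\n3.")
--         except: continue
--         try: sample = sample.replace("4.", "\n4.")
--         except: continue
--         try: sample = sample.replace("5.", "\n5.")
--         except: continue
--         try: sample = sample.replace("6.", "\n6.")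
--         except: continue
--         try: sample = sample.replace("7.", "\n7.")
--         except: continue
--         # Remove any leading or trailing whitespace
--         sample = sample.strip()
--
--         formatted_outputs.append(sample)
--
--     return formatted_outputs
-- ===== SOURCE B (Python) =====
-- TOKENS = [
--     "History:", "Technique:", "Comparison:", "Findings:", "Impression:",
--     "Lungs and Airways:", "Musculoskeletal and Chest Wall:", "Cardiovascular:",
--     "Tubes, Catheters, and Support Devices:", "Abdominal:", "Pleura:", "Other:",
--     "Hila and Mediastinum:",
--     "- ", "1.", "2.", "3.", "4.", "5.", "6.", "7.",
-- ]
--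
-- def reformat_radiology_output(output_list):
--     # Single left-to-right pass over each sample: at each position, if a trigger
--     # token starts there, emit "\n" + token and jump past it; else copy the char.
--     res = []
--     for sample in output_list:
--         s = sample.replace("<pad>", "").strip()
--         out = []
--         i = 0
--         n = len(s)
--         while i < n:
--             for tok in TOKENS:
--                 if s.startswith(tok, i):
--                     out.append("\n" + tok)
--                     i += len(tok)
--                     break
--             else:
--                 out.append(s[i])
--                 i += 1
--         res.append("".join(out).strip())
--     return res
-- ===== Notes on version B (the rewrite author's own statement) =====
-- stated objective: alternative
-- what changed: Replaces A's 21 sequential whole-string str.replace passes by one left-to-right scan over a table of the 21 trigger tokens, inserting a newline before each occurrence in a single pass (valid because no token overlaps, is a prefix/suffix-of-prefix of, or contains another, and none contains a newline).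
import Mathlib
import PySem

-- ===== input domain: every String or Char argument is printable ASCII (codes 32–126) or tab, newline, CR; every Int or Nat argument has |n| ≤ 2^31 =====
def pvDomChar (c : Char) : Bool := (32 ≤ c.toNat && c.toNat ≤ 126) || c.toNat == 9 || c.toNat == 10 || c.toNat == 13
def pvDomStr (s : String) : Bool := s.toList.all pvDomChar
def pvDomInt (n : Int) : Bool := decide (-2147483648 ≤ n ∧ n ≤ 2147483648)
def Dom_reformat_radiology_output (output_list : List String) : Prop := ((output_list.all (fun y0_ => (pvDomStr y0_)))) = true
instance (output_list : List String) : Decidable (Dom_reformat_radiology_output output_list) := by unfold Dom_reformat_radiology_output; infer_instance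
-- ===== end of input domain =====

-- B replaces A's 21 sequential whole-string replaces by ONE left-to-right scan over a
-- token table (alternative algorithm, same return value; no speed claim).

-- ===== PORT A =====
-- A's section/organ header tables (module constants of the loops), as char lists
def pvSections : List (List Char) :=
  ["History:".toList, "Technique:".toList, "Comparison:".toList, "Findings:".toList,
   "Impression:".toList]
def pvOrgans : List (List Char) :=
  ["Lungs and Airways:".toList, "Musculoskeletal and Chest Wall:".toList,
   "Cardiovascular:".toList, "Tubes, Catheters, and Support Devices:".toList,
   "Abdominal:".toList, "Pleura:".toList, "Other:".toList, "Hila and Mediastinum:".toList]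
-- sample.replace(tok, f"\n{tok}")
def pvRep (s t : List Char) : List Char := PySem.Chars.replace s t ('\n' :: t)
-- the per-sample body of A's loop (the try/except around replace can never fire: str.replace does not raise)
def pvFmtA (cs : List Char) : List Char :=
  let s := PySem.Chars.strip (PySem.Chars.replace cs "<pad>".toList [])
  let s := pvSections.foldl pvRep s            -- for section in sections: ...
  let s := pvOrgans.foldl pvRep s              -- for organ in organs: ...
  let s := pvRep s "- ".toList
  let s := pvRep s "1.".toList
  let s := pvRep s "2.".toList
  let s := pvRep s "3.".toList
  let s := pvRep s "4.".toList
  let s := pvRep s "5.".toList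
  let s := pvRep s "6.".toList
  let s := pvRep s "7.".toList
  PySem.Chars.strip s
def reformat_radiology_output (output_list : List String) : List String :=
  output_list.foldl (fun acc sample => acc ++ [String.ofList (pvFmtA sample.toList)]) []

-- ===== PORT B =====
-- B's TOKENS table, in the same order
def pvTokens : List (List Char) :=
  ["History:".toList, "Technique:".toList, "Comparison:".toList, "Findings:".toList,
   "Impression:".toList,
   "Lungs and Airways:".toList, "Musculoskeletal and Chest Wall:".toList,
   "Cardiovascular:".toList, "Tubes, Catheters, and Support Devices:".toList,
   "Abdominal:".toList, "Pleura:".toList, "Other:".toList, "Hila and Mediastinum:".toList,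
   "- ".toList, "1.".toList, "2.".toList, "3.".toList, "4.".toList, "5.".toList,
   "6.".toList, "7.".toList]
-- B's while loop: at each position, first token of the table starting here (if any)
def pvScan (T : List (List Char)) : List Char → List Char
  | [] => []
  | c :: s =>
    match T.find? (fun u => !u.isEmpty && u.isPrefixOf (c :: s)) with
    | some u => '\n' :: (u ++ pvScan T (s.drop (u.length - 1)))
    | none => c :: pvScan T s
termination_by s => s.length
decreasing_by all_goals (simp only [List.length_drop, List.length_cons]; omega)
def pvFmtB (cs : List Char) : List Char :=
  PySem.Chars.strip (pvScan pvTokens (PySem.Chars.strip (PySem.Chars.replace cs "<pad>".toList [])))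
def reformat_radiology_output_alt (output_list : List String) : List String :=
  output_list.foldl (fun acc sample => acc ++ [String.ofList (pvFmtB sample.toList)]) []

-- ===== PRECONDITION & SPEC =====
def Spec_reformat_radiology_output (output_list : List String) (out : List String) : Prop := out = reformat_radiology_output_alt output_list
instance (output_list : List String) (out : List String) : Decidable (Spec_reformat_radiology_output output_list out) := by unfold Spec_reformat_radiology_output; infer_instance

-- ===== CLAIM (what is proved, stated in full; the proofs are below) =====
def Claim_equal_reformat_radiology_output : Prop := ∀ (output_list : List String), Dom_reformat_radiology_output output_list → Spec_reformat_radiology_output output_list (reformat_radiology_output output_list)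

-- ===== LEMMAS AND PROOFS =====

-- The token table is "independent": tokens nonempty, newline-free, pairwise distinct, and
-- no token is prefix-comparable with a nonempty proper suffix of any token nor with another token.
set_option maxHeartbeats 4000000 in
theorem pvTokens_good :
    (∀ t ∈ pvTokens, t ≠ [] ∧ '\n' ∉ t) ∧ pvTokens.Nodup ∧
    (∀ t ∈ pvTokens, ∀ u ∈ pvTokens, ∀ j, j < u.length → (t ≠ u ∨ 0 < j) →
      ¬ t <+: u.drop j ∧ ¬ u.drop j <+: t) := by
  decide

theorem pvScan_nil (T : List (List Char)) : pvScan T [] = [] := by simp [pvScan]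
theorem pvScan_cons_some (T : List (List Char)) (c : Char) (s u : List Char)
    (h : T.find? (fun u => !u.isEmpty && u.isPrefixOf (c :: s)) = some u) :
    pvScan T (c :: s) = '\n' :: (u ++ pvScan T (s.drop (u.length - 1))) := by
  rw [pvScan, h]
theorem pvScan_cons_none (T : List (List Char)) (c : Char) (s : List Char)
    (h : T.find? (fun u => !u.isEmpty && u.isPrefixOf (c :: s)) = none) :
    pvScan T (c :: s) = c :: pvScan T s := by
  rw [pvScan, h]
theorem pvScan_nil_tok (s : List Char) : pvScan [] s = s := by
  induction s with
  | nil => simp [pvScan]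
  | cons c s ih => rw [pvScan_cons_none [] c s rfl, ih]
theorem pvGo_eq (t : List Char) (ht : t ≠ []) :
    ∀ (fuel : Nat) (l acc : List Char), l.length ≤ fuel →
      PySem.Chars.replace.go t ('\n' :: t) fuel l acc = acc.reverse ++ pvScan [t] l := by
  intro fuel
  induction fuel with
  | zero =>
    intro l acc hl
    have : l = [] := by cases l <;> simp_all
    subst this
    rw [PySem.Chars.replace.go.eq_def]
    simp [pvScan_nil]
  | succ fuel ih =>
    intro l acc hl
    cases l with
    | nil => rw [PySem.Chars.replace.go.eq_def]; simp [pvScan_nil]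
    | cons c rest =>
      by_cases hp : t.isPrefixOf (c :: rest) = true
      · rw [PySem.Chars.replace.go.eq_def]
        simp only [hp, if_true]
        have hlen : (List.drop t.length (c :: rest)).length ≤ fuel := by
          simp only [List.length_drop, List.length_cons]
          have : 1 ≤ t.length := by cases t <;> simp_all
          simp only [List.length_cons] at hl; omega
        rw [ih _ _ hlen]
        have hfind : List.find? (fun u => !u.isEmpty && u.isPrefixOf (c :: rest)) [t] = some t := by
          cases t with
          | nil => exact absurd rfl ht
          | cons a t' => simp [List.find?, hp]
        rw [pvScan_cons_some _ _ _ _ hfind]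
        have : rest.drop (t.length - 1) = List.drop t.length (c :: rest) := by
          have : 1 ≤ t.length := by cases t <;> simp_all
          obtain ⟨k, hk⟩ : ∃ k, t.length = k + 1 := ⟨t.length - 1, by omega⟩
          rw [hk]; simp
        rw [this]; simp
      · rw [PySem.Chars.replace.go.eq_def]
        simp only [hp]
        have hlen : rest.length ≤ fuel := by simp only [List.length_cons] at hl; omega
        rw [if_neg (by simp_all), ih _ _ hlen]
        have hfind : List.find? (fun u => !u.isEmpty && u.isPrefixOf (c :: rest)) [t] = none := by
          simp [List.find?, hp]
        rw [pvScan_cons_none _ _ _ hfind]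
        simp

theorem pvRep_eq_scan (s t : List Char) (ht : t ≠ []) :
    pvRep s t = pvScan [t] s := by
  rw [pvRep, PySem.Chars.replace]
  rw [if_neg (by simp [ht])]
  rw [pvGo_eq t ht s.length s [] le_rfl]
  simp

theorem pvScan_copy (T : List (List Char)) :
    ∀ (k : Nat) (x : List Char), (∀ j, j < k → ∀ u ∈ T, ¬ u <+: x.drop j) →
      pvScan T x = x.take k ++ pvScan T (x.drop k) := by
  intro k
  induction k with
  | zero => intro x h; simp
  | succ k ih =>
    intro x h
    cases x with
    | nil => simp [pvScan_nil]
    | cons c s =>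
      have hfind : List.find? (fun u => !u.isEmpty && u.isPrefixOf (c :: s)) T = none := by
        rw [List.find?_eq_none]
        intro u hu
        have := h 0 (Nat.succ_pos k) u hu
        simp only [List.drop_zero] at this
        simp [List.isPrefixOf_iff_prefix, this]
      rw [pvScan_cons_none _ _ _ hfind]
      rw [ih s (fun j hj u hu => by
        have := h (j+1) (by omega) u hu
        simpa using this)]
      simp

theorem pvScan_prefix_rev (T : List (List Char)) :
    ∀ (n : Nat) (y w : List Char), y.length ≤ n → '\n' ∉ w → w <+: pvScan T y → w <+: y := by
  intro n
  induction n with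
  | zero =>
    intro y w hy hw hp
    have : y = [] := by cases y <;> simp_all
    subst this
    rw [pvScan_nil] at hp
    simpa using hp
  | succ n ih =>
    intro y w hy hw hp
    cases y with
    | nil => rw [pvScan_nil] at hp; simpa using hp
    | cons c s =>
      cases hf : List.find? (fun u => !u.isEmpty && u.isPrefixOf (c :: s)) T with
      | some u =>
        rw [pvScan_cons_some _ _ _ _ hf] at hp
        cases w with
        | nil => exact List.nil_prefix
        | cons a w' =>
          rw [List.cons_prefix_cons] at hp
          exact absurd (hp.1 ▸ List.mem_cons_self) hw
      | none =>
        rw [pvScan_cons_none _ _ _ hf] at hp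
        cases w with
        | nil => exact List.nil_prefix
        | cons a w' =>
          rw [List.cons_prefix_cons] at hp
          rw [List.cons_prefix_cons]
          refine ⟨hp.1, ih s w' (by simp at hy; omega) (fun hm => hw (List.mem_cons_of_mem _ hm)) hp.2⟩

theorem pvScan_step (t : List Char) (T : List (List Char))
    (ht : t ≠ []) (htn : '\n' ∉ t) (hT : ∀ u ∈ T, u ≠ [])
    (h4 : ∀ u ∈ T, ∀ j, j < u.length → ¬ t <+: u.drop j ∧ ¬ u.drop j <+: t)
    (h5 : ∀ u ∈ T, ∀ j, 0 < j → j < t.length → ¬ u <+: t.drop j ∧ ¬ t.drop j <+: u) :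
    ∀ (n : Nat) (s : List Char), s.length ≤ n →
      pvScan [t] (pvScan T s) = pvScan (T ++ [t]) s := by
  have htpos : 1 ≤ t.length := by cases t <;> simp_all
  have hhead : ∀ z : List Char, ¬ t <+: '\n' :: z := by
    intro z contra
    cases t with
    | nil => exact ht rfl
    | cons a t₁ =>
      rw [List.cons_prefix_cons] at contra
      exact htn (contra.1 ▸ List.mem_cons_self)
  intro n
  induction n with
  | zero =>
    intro s hs
    have : s = [] := by cases s <;> simp_all
    subst this; simp [pvScan_nil]
  | succ n ih =>
    intro s hs
    cases s with
    | nil => simp [pvScan_nil]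
    | cons c s₀ =>
      cases hf : T.find? (fun u => !u.isEmpty && u.isPrefixOf (c :: s₀)) with
      | some u =>
        have hu : u ∈ T := List.mem_of_find?_eq_some hf
        have hpu : u <+: (c :: s₀) := by
          have := List.find?_some hf; simp [List.isPrefixOf_iff_prefix] at this; exact this.2
        have hune : u ≠ [] := hT u hu
        have hupos : 1 ≤ u.length := by cases u <;> simp_all
        rw [pvScan_cons_some T c s₀ u hf]
        have hdropeq : s₀.drop (u.length - 1) = (c :: s₀).drop u.length := by
          obtain ⟨k, hk⟩ : ∃ k, u.length = k + 1 := ⟨u.length - 1, by omega⟩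
          rw [hk]; simp
        set Z := pvScan T (s₀.drop (u.length - 1)) with hZ
        have hcopy := pvScan_copy [t] (u.length + 1) ('\n' :: (u ++ Z)) (by
          intro j hj v hv contra
          simp only [List.mem_singleton] at hv
          subst hv
          cases j with
          | zero => exact hhead _ contra
          | succ j' =>
            simp only [List.drop_succ_cons] at contra
            rw [List.drop_append_of_le_length (by omega)] at contra
            rcases List.prefix_or_prefix_of_prefix contra (List.prefix_append _ _) with h | h
            · exact (h4 u hu j' (by omega)).1 h
            · exact (h4 u hu j' (by omega)).2 h)
        have hx : '\n' :: (u ++ Z) = ('\n' :: u) ++ Z := by simp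
        rw [hcopy, hx, List.take_left' (by simp), List.drop_left' (by simp)]
        have hlen : (s₀.drop (u.length - 1)).length ≤ n := by
          simp only [List.length_drop]
          simp only [List.length_cons] at hs; omega
        rw [hZ, ih _ hlen]
        have hf' : (T ++ [t]).find? (fun u => !u.isEmpty && u.isPrefixOf (c :: s₀)) = some u := by
          rw [List.find?_append, hf]; rfl
        rw [pvScan_cons_some (T ++ [t]) c s₀ u hf']
        simp
      | none =>
        have hnopre : ∀ u ∈ T, ¬ u <+: (c :: s₀) := by
          intro u hu contra
          have := List.find?_eq_none.mp hf u hu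
          simp [List.isPrefixOf_iff_prefix, hT u hu, contra] at this
        by_cases hb : t <+: (c :: s₀)
        · have hnoj : ∀ j, j < t.length → ∀ u ∈ T, ¬ u <+: (c :: s₀).drop j := by
            intro j hj u hu contra
            cases j with
            | zero => exact hnopre u hu (by simpa using contra)
            | succ j' =>
              have hdt : t.drop (j' + 1) <+: (c :: s₀).drop (j' + 1) := List.IsPrefix.drop hb _
              rcases List.prefix_or_prefix_of_prefix contra hdt with h | h
              · exact (h5 u hu (j' + 1) (by omega) hj).1 h
              · exact (h5 u hu (j' + 1) (by omega) hj).2 h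
          have hcopy := pvScan_copy T t.length (c :: s₀) hnoj
          have htake : (c :: s₀).take t.length = t := (List.prefix_iff_eq_take.mp hb).symm
          rw [hcopy, htake]
          set Z := pvScan T ((c :: s₀).drop t.length) with hZ
          have hstep1 : pvScan [t] (t ++ Z) = '\n' :: (t ++ pvScan [t] Z) := by
            cases t with
            | nil => exact absurd rfl ht
            | cons a t₁ =>
              have hfind2 : List.find? (fun u => !u.isEmpty && u.isPrefixOf (a :: (t₁ ++ Z))) [a :: t₁] = some (a :: t₁) := by
                refine List.find?_cons_of_pos ?_
                simp [List.isPrefixOf_iff_prefix]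
              have : (a :: t₁) ++ Z = a :: (t₁ ++ Z) := by simp
              rw [this, pvScan_cons_some [a :: t₁] a (t₁ ++ Z) (a :: t₁) hfind2]
              simp
          rw [hstep1]
          have hlen : ((c :: s₀).drop t.length).length ≤ n := by
            simp only [List.length_drop, List.length_cons]
            simp only [List.length_cons] at hs; omega
          rw [hZ, ih _ hlen]
          have hft : (T ++ [t]).find? (fun u => !u.isEmpty && u.isPrefixOf (c :: s₀)) = some t := by
            rw [List.find?_append, hf, Option.none_or]
            refine List.find?_cons_of_pos ?_
            cases t with
            | nil => exact absurd rfl ht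
            | cons a t₁ => simp [List.isPrefixOf_iff_prefix, hb]
          rw [pvScan_cons_some (T ++ [t]) c s₀ t hft]
          have hdropeq : s₀.drop (t.length - 1) = (c :: s₀).drop t.length := by
            obtain ⟨k, hk⟩ : ∃ k, t.length = k + 1 := ⟨t.length - 1, by omega⟩
            rw [hk]; simp
          rw [hdropeq]
        · rw [pvScan_cons_none T c s₀ hf]
          have hft1 : List.find? (fun u => !u.isEmpty && u.isPrefixOf (c :: pvScan T s₀)) [t] = none := by
            have hnpre : ¬ t <+: c :: pvScan T s₀ := by
              intro contra
              have hcs : c :: pvScan T s₀ = pvScan T (c :: s₀) := (pvScan_cons_none T c s₀ hf).symm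
              rw [hcs] at contra
              exact hb (pvScan_prefix_rev T (n + 1) (c :: s₀) t hs htn contra)
            have hcond : ¬ ((fun u => !u.isEmpty && u.isPrefixOf (c :: pvScan T s₀)) t = true) := by
              simp [List.isPrefixOf_iff_prefix, hnpre]
            simpa using List.find?_cons_of_neg (l := []) hcond
          rw [pvScan_cons_none [t] c (pvScan T s₀) hft1]
          have hlen : s₀.length ≤ n := by simp only [List.length_cons] at hs; omega
          rw [ih _ hlen]
          have hft2 : (T ++ [t]).find? (fun u => !u.isEmpty && u.isPrefixOf (c :: s₀)) = none := by
            rw [List.find?_append, hf, Option.none_or]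
            have hcond : ¬ ((fun u => !u.isEmpty && u.isPrefixOf (c :: s₀)) t = true) := by
              simp [List.isPrefixOf_iff_prefix, hb]
            simpa using List.find?_cons_of_neg (l := []) hcond
          rw [pvScan_cons_none (T ++ [t]) c s₀ hft2]

theorem pvScan_fold (L : List (List Char))
    (g1 : ∀ t ∈ L, t ≠ [] ∧ '\n' ∉ t) (g3 : L.Nodup)
    (g2 : ∀ t ∈ L, ∀ u ∈ L, ∀ j, j < u.length → (t ≠ u ∨ 0 < j) →
      ¬ t <+: u.drop j ∧ ¬ u.drop j <+: t) :
    ∀ (ts T : List (List Char)) (s : List Char), T ++ ts = L →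
      ts.foldl (fun s t => pvScan [t] s) (pvScan T s) = pvScan L s := by
  intro ts
  induction ts with
  | nil =>
    intro T s hTL
    simp only [List.append_nil] at hTL
    subst hTL
    rfl
  | cons t ts ih =>
    intro T s hTL
    have htL : t ∈ L := hTL ▸ (List.mem_append.mpr (Or.inr List.mem_cons_self))
    have hsubT : ∀ u ∈ T, u ∈ L := fun u hu => hTL ▸ (List.mem_append.mpr (Or.inl hu))
    have hnotin : t ∉ T := by
      have := hTL ▸ g3
      rcases List.nodup_append.mp this with ⟨_, _, hdisj⟩
      intro hmem
      exact hdisj t hmem t List.mem_cons_self rfl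
    have hstep := pvScan_step t T (g1 t htL).1 (g1 t htL).2
      (fun u hu => (g1 u (hsubT u hu)).1)
      (fun u hu j hj => g2 t htL u (hsubT u hu) j hj
        (Or.inl (fun he => hnotin (he ▸ hu))))
      (fun u hu j hj0 hjt => g2 u (hsubT u hu) t htL j hjt (Or.inr hj0))
      s.length s le_rfl
    show List.foldl (fun s t => pvScan [t] s) (pvScan [t] (pvScan T s)) ts = pvScan L s
    rw [hstep]
    exact ih (T ++ [t]) s (by rw [List.append_assoc]; exact hTL)

theorem pvFmt_eq (cs : List Char) : pvFmtA cs = pvFmtB cs := by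
  have g := pvTokens_good
  have key := pvScan_fold pvTokens g.1 g.2.1 g.2.2 pvTokens []
    (PySem.Chars.strip (PySem.Chars.replace cs "<pad>".toList [])) rfl
  simp only [pvScan_nil_tok] at key
  unfold pvFmtA pvFmtB
  simp only [pvSections, pvOrgans, List.foldl]
  rw [← key]
  simp only [pvTokens, List.foldl]
  repeat rw [pvRep_eq_scan]
  all_goals decide

-- ===== VERDICT (by name: the statement is the Claim_ definition above) =====
theorem reformat_radiology_output_spec : Claim_equal_reformat_radiology_output := by
  intro output_list _
  unfold Spec_reformat_radiology_output reformat_radiology_output reformat_radiology_output_alt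
  rw [PySem.List.foldl_append_singleton_eq_map, PySem.List.foldl_append_singleton_eq_map]
  exact congrArg _ (List.map_congr_left (fun sample _ => congrArg String.ofList (pvFmt_eq sample.toList)))
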